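-- pv_equiv track=rewrite | github.com/jared-schmidt-civ/JFrog-Cloud-Installers | Ansible/ansible_collections/jfrog/platform/plugins/module_utils/ArtifactoryApi.py | _sortConfigs
-- ===== SOURCE A (Python) =====
-- def _sortConfigs(configRecordListA, configRecordListB):
--     '''This helper function performs some set algebra to determine what is just in
--     configRecordListA, what is in configRecordListB, and what is in both.'''
--     inBoth = list()
--     onlyInListA = list()
--     onlyInListB = configRecordListB.copy()
--     for item in configRecordListA:
--         if item in configRecordListB:
--             inBoth.append(item.copy())
--             onlyInListB.remove(item)
--         else:
--             onlyInListA.append(item.copy())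
--     return (onlyInListA, inBoth, onlyInListB)
-- ===== SOURCE B (Python) =====
-- def _sortConfigs(configRecordListA, configRecordListB):
--     '''Single-pass partition using a hash index of canonical record keys:
--     count B's records by key, classify A's records with O(1) lookups, then
--     emit B's leftovers by skipping, per key, as many occurrences as A matched.'''
--     def _key(d):
--         return tuple(sorted(d.items(), key=lambda kv: kv[0]))
--     bcount = {}
--     for d in configRecordListB:
--         k = _key(d)
--         bcount[k] = bcount.get(k, 0) + 1
--     onlyInListA = []
--     inBoth = []
--     removed = {}
--     for d in configRecordListA:
--         k = _key(d)
--         if k in bcount: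
--             inBoth.append(d.copy())
--             removed[k] = removed.get(k, 0) + 1
--         else:
--             onlyInListA.append(d.copy())
--     onlyInListB = []
--     seen = {}
--     for d in configRecordListB:
--         k = _key(d)
--         seen[k] = seen.get(k, 0) + 1
--         if seen[k] > removed.get(k, 0):
--             onlyInListB.append(d)
--     return (onlyInListA, inBoth, onlyInListB)
-- ===== Notes on version B (the rewrite author's own statement) =====
-- stated objective: alternative
-- what changed: Replaces the per-item linear membership scan and repeated list.remove of A by a hash index keyed on each record's canonical (sorted-items) form: count B's records once, classify A's records by dictionary lookup, and emit B's leftovers in one skip pass instead of repeated removals.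
-- crash fix: When some record occurs more often in configRecordListA than in configRecordListB while occurring in configRecordListB at all, A's onlyInListB.remove(item) raises ValueError; B returns the partition with all matching B-occurrences consumed. — e.g. on _sortConfigs([[("k", "1")], [("k", "1")]], [[("k", "1")]]): A raises ValueError, B returns ([], [[("k", "1")], [("k", "1")]], [])
import Mathlib
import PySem

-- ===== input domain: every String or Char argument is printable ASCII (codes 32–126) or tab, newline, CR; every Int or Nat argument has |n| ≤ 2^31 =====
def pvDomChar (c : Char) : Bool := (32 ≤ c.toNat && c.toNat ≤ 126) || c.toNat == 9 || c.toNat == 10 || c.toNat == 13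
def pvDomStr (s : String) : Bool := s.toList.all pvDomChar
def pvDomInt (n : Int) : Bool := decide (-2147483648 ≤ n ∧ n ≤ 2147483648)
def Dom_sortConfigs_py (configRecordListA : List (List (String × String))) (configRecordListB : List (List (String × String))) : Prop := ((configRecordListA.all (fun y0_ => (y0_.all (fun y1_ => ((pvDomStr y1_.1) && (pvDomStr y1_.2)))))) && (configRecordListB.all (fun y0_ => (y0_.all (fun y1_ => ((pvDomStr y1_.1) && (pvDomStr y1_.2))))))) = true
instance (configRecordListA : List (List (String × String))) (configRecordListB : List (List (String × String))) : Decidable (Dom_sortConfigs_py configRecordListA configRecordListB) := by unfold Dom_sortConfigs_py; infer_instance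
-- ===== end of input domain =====

-- B replaces A's per-item membership scans and repeated list.remove by a hash index on canonical
-- record keys (objective: alternative). Records are Python dicts, so `==`/`in`/`remove` compare
-- mappings; pyDictEq below is that equality on the assoc-list representation.

-- ===== PORT A =====
-- Python dict equality d1 == d2 (dict(r1) == dict(r2)): same size and same value at every key.
def pyDictEq (r1 r2 : List (String × String)) : Bool :=
  (PySem.Dict.ofList r1).size == (PySem.Dict.ofList r2).size &&
  (PySem.Dict.ofList r1).items.all (fun p => (PySem.Dict.ofList r2).get? p.1 == some p.2)

-- list.remove(item): drop the first element == item (Pre_ excludes the ValueError case;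
-- when no element matches this returns the list unchanged).
def removeBy (p : List (String × String) → Bool) : List (List (String × String)) → List (List (String × String))
  | [] => []
  | x :: t => if p x then t else x :: removeBy p t

def sortConfigs_py (configRecordListA : List (List (String × String))) (configRecordListB : List (List (String × String))) : (List (List (String × String))) × (List (List (String × String))) × (List (List (String × String))) :=
  -- inBoth = []; onlyInListA = []; onlyInListB = B.copy(); for item in A: …
  let res := configRecordListA.foldl
    (fun st item =>
      if configRecordListB.any (fun r => pyDictEq r item) then
        (st.1, st.2.1 ++ [item], removeBy (fun r => pyDictEq r item) st.2.2)
      else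
        (st.1 ++ [item], st.2.1, st.2.2))
    (([] : List (List (String × String))), ([] : List (List (String × String))), configRecordListB)
  res

-- ===== PORT B =====
-- _key(d) = tuple(sorted(d.items(), key=lambda kv: kv[0]))
def canonKey (r : List (String × String)) : List (String × String) :=
  PySem.List.sorted (PySem.Dict.ofList r).items Prod.fst

def sortConfigs_py_alt (configRecordListA : List (List (String × String))) (configRecordListB : List (List (String × String))) : (List (List (String × String))) × (List (List (String × String))) × (List (List (String × String))) :=
  -- bcount[k] = bcount.get(k, 0) + 1 over B
  let bcount := configRecordListB.foldl
    (fun d r => d.modify (canonKey r) 0 (· + 1)) (PySem.Dict.empty : PySem.Dict (List (String × String)) Int)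
  -- classify A's records
  let s2 := configRecordListA.foldl
    (fun st r =>
      let k := canonKey r
      if bcount.contains k then
        (st.1, st.2.1 ++ [r], st.2.2.modify k 0 (· + 1))
      else
        (st.1 ++ [r], st.2.1, st.2.2))
    (([] : List (List (String × String))), ([] : List (List (String × String))),
      (PySem.Dict.empty : PySem.Dict (List (String × String)) Int))
  let removed := s2.2.2
  -- emit B's leftovers, skipping removed[k] occurrences per key
  let s3 := configRecordListB.foldl
    (fun st r =>
      let k := canonKey r
      let seen := st.2.modify k 0 (· + 1)
      if removed.getD k 0 < seen.getD k 0 then (st.1 ++ [r], seen) else (st.1, seen))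
    (([] : List (List (String × String))), (PySem.Dict.empty : PySem.Dict (List (String × String)) Int))
  (s2.1, s2.2.1, s3.1)

-- ===== PRECONDITION & SPEC =====
-- Pre_ excludes exactly the inputs on which A raises ValueError: some record occurring in B
-- occurs strictly more often (under dict equality) in A than in B, so onlyInListB.remove(item)
-- eventually misses.
def Pre_sortConfigs_py (configRecordListA : List (List (String × String))) (configRecordListB : List (List (String × String))) : Prop :=
  ∀ r ∈ configRecordListA, configRecordListB.any (fun x => pyDictEq x r) = true →
    configRecordListA.countP (fun x => pyDictEq x r) ≤ configRecordListB.countP (fun x => pyDictEq x r)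
instance (configRecordListA : List (List (String × String))) (configRecordListB : List (List (String × String))) : Decidable (Pre_sortConfigs_py configRecordListA configRecordListB) := by unfold Pre_sortConfigs_py; infer_instance

def pvWitness_sortConfigs_py : (List (List (String × String))) × (List (List (String × String))) :=
  ([[("a", "1")], [("b", "2")]], [[("a", "1")], [("c", "3")]])

-- A raises ValueError when some record present in B occurs more often in A than in B; B returns
-- the partition with all matching B-occurrences consumed.
def Raises_sortConfigs_py (configRecordListA : List (List (String × String))) (configRecordListB : List (List (String × String))) : Prop :=
  ∃ r ∈ configRecordListA, configRecordListB.any (fun x => pyDictEq x r) = true ∧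
    configRecordListB.countP (fun x => pyDictEq x r) < configRecordListA.countP (fun x => pyDictEq x r)
instance (configRecordListA : List (List (String × String))) (configRecordListB : List (List (String × String))) : Decidable (Raises_sortConfigs_py configRecordListA configRecordListB) := by unfold Raises_sortConfigs_py; infer_instance

def pvRaiseWitness_sortConfigs_py : (List (List (String × String))) × (List (List (String × String))) :=
  ([[("k", "1")], [("k", "1")]], [[("k", "1")]])
def pvRaiseWitnessOut_sortConfigs_py : (List (List (String × String))) × (List (List (String × String))) × (List (List (String × String))) :=
  ([], [[("k", "1")], [("k", "1")]], [])

def Spec_sortConfigs_py (configRecordListA : List (List (String × String))) (configRecordListB : List (List (String × String))) (out : (List (List (String × String))) × (List (List (String × String))) × (List (List (String × String)))) : Prop := out = sortConfigs_py_alt configRecordListA configRecordListB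
instance (configRecordListA : List (List (String × String))) (configRecordListB : List (List (String × String))) (out : (List (List (String × String))) × (List (List (String × String))) × (List (List (String × String)))) : Decidable (Spec_sortConfigs_py configRecordListA configRecordListB out) := by unfold Spec_sortConfigs_py; infer_instance

-- ===== CLAIM (what is proved, stated in full; the proofs are below) =====
def Claim_equal_sortConfigs_py : Prop := ∀ (configRecordListA : List (List (String × String))) (configRecordListB : List (List (String × String))), Dom_sortConfigs_py configRecordListA configRecordListB → Pre_sortConfigs_py configRecordListA configRecordListB → Spec_sortConfigs_py configRecordListA configRecordListB (sortConfigs_py configRecordListA configRecordListB)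
def Claim_raises_sortConfigs_py : Prop := (∀ (configRecordListA : List (List (String × String))) (configRecordListB : List (List (String × String))), Dom_sortConfigs_py configRecordListA configRecordListB → Raises_sortConfigs_py configRecordListA configRecordListB → ¬ Pre_sortConfigs_py configRecordListA configRecordListB) ∧ (Dom_sortConfigs_py (pvRaiseWitness_sortConfigs_py.1) (pvRaiseWitness_sortConfigs_py.2) ∧ Raises_sortConfigs_py (pvRaiseWitness_sortConfigs_py.1) (pvRaiseWitness_sortConfigs_py.2) ∧ sortConfigs_py_alt (pvRaiseWitness_sortConfigs_py.1) (pvRaiseWitness_sortConfigs_py.2) = pvRaiseWitnessOut_sortConfigs_py)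

-- ===== LEMMAS AND PROOFS =====

-- find? on an assoc list with nodup keys finds exactly the members
theorem find_assoc_nodup {l : List (String × String)} (hn : (l.map Prod.fst).Nodup) (k v : String) :
    l.find? (fun p => p.1 == k) = some (k, v) ↔ (k, v) ∈ l := by
  constructor
  · intro h
    exact List.mem_of_find?_eq_some h
  · intro hm
    induction l with
    | nil => simp at hm
    | cons p t ih =>
      simp only [List.map_cons, List.nodup_cons] at hn
      rcases List.mem_cons.mp hm with h | h
      · subst h; simp [List.find?]
      · have hne : (p.1 == k) = false := by
          have : k ∈ t.map Prod.fst := List.mem_map.mpr ⟨(k, v), h, rfl⟩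
          simp only [beq_eq_false_iff_ne, ne_eq]
          intro he; exact hn.1 (he ▸ this)
        simp [List.find?, hne, ih hn.2 h]

-- pyDictEq is permutation of the collapsed items lists
theorem pyDictEq_iff_perm (r1 r2 : List (String × String)) :
    pyDictEq r1 r2 = true ↔ ((PySem.Dict.ofList r1).items).Perm ((PySem.Dict.ofList r2).items) := by
  have h1 : (((PySem.Dict.ofList r1).items).map Prod.fst).Nodup := PySem.Dict.nodup_keys_ofList r1
  have h2 : (((PySem.Dict.ofList r2).items).map Prod.fst).Nodup := PySem.Dict.nodup_keys_ofList r2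
  simp only [pyDictEq, Bool.and_eq_true, beq_iff_eq, List.all_eq_true, PySem.Dict.size]
  constructor
  · rintro ⟨hlen, hall⟩
    have hsub : (PySem.Dict.ofList r1).items ⊆ (PySem.Dict.ofList r2).items := by
      intro p hp
      have := hall p hp
      simp only [PySem.Dict.get?, Option.map_eq_some_iff] at this
      obtain ⟨q, hq, hq2⟩ := this
      have hk : q.1 = p.1 := by simpa using List.find?_some hq
      have hqmem := List.mem_of_find?_eq_some hq
      have hqp : q = p := Prod.ext hk hq2
      rwa [hqp] at hqmem
    exact List.Subperm.perm_of_length_le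
      (List.subperm_of_subset (List.Nodup.of_map Prod.fst h1) hsub) (le_of_eq hlen.symm)
  · intro hp
    refine ⟨hp.length_eq, ?_⟩
    intro p hmem
    have hmem2 : (p.1, p.2) ∈ (PySem.Dict.ofList r2).items := by
      have : p ∈ (PySem.Dict.ofList r2).items := hp.mem_iff.mp hmem
      simpa using this
    simp only [PySem.Dict.get?, (find_assoc_nodup h2 p.1 p.2).mpr hmem2, Option.map_some]

-- the canonical key characterizes dict equality
theorem pyDictEq_iff_canon (r1 r2 : List (String × String)) :
    pyDictEq r1 r2 = true ↔ canonKey r1 = canonKey r2 := by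
  rw [pyDictEq_iff_perm]
  constructor
  · intro hp
    have hperm : (canonKey r2).Perm ((PySem.Dict.ofList r1).items) :=
      ((PySem.List.sorted_perm _ Prod.fst false).trans hp.symm)
    have hpw : List.Pairwise (fun a b : String × String => a.1 < b.1) (canonKey r2) := by
      have hle : List.Pairwise (fun a b : String × String => a.1 ≤ b.1) (canonKey r2) :=
        PySem.List.sorted_pairwise _ Prod.fst
      have hnd : ((canonKey r2).map Prod.fst).Nodup :=
        (((PySem.List.sorted_perm _ Prod.fst false).map Prod.fst).nodup_iff).mpr
          (PySem.Dict.nodup_keys_ofList r2)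
      have hne : List.Pairwise (fun a b : String × String => a.1 ≠ b.1) (canonKey r2) :=
        List.pairwise_map.mp hnd
      exact (hle.and hne).imp (fun h => lt_of_le_of_ne h.1 h.2)
    exact PySem.List.sorted_eq_of_perm_of_pairwise_lt _ _ Prod.fst hperm hpw
  · intro hc
    have p1 : (canonKey r1).Perm ((PySem.Dict.ofList r1).items) :=
      PySem.List.sorted_perm _ Prod.fst false
    have p2 : (canonKey r2).Perm ((PySem.Dict.ofList r2).items) :=
      PySem.List.sorted_perm _ Prod.fst false
    have p2' : (canonKey r1).Perm ((PySem.Dict.ofList r2).items) := by rw [hc]; exact p2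
    exact p1.symm.trans p2'

theorem pyDictEq_eq_beq (r1 r2 : List (String × String)) :
    pyDictEq r1 r2 = (canonKey r1 == canonKey r2) := by
  rw [Bool.eq_iff_iff, pyDictEq_iff_canon, beq_iff_eq]

-- membership test: A's `item in B` equals B's `key in bcount`
theorem contains_foldl_modify (l : List (List (String × String)))
    (d : PySem.Dict (List (String × String)) Int) (k : List (String × String)) :
    (l.foldl (fun d r => d.modify (canonKey r) 0 (· + 1)) d).contains k
      = (l.any (fun r => canonKey r == k) || d.contains k) := by
  induction l generalizing d with
  | nil => simp
  | cons x t ih =>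
    simp only [List.foldl_cons, ih, PySem.Dict.contains_modify, List.any_cons]
    have hcomm : ((k : List (String × String)) == canonKey x) = (canonKey x == k) := by
      by_cases h : k = canonKey x
      · simp [h]
      · have h2 : ¬ canonKey x = k := fun he => h he.symm
        simp [h, h2]
    rw [hcomm]
    cases canonKey x == k <;> simp

theorem mem_test_eq (b : List (List (String × String))) (r : List (String × String)) :
    (b.any (fun x => pyDictEq x r))
      = ((b.foldl (fun d x => d.modify (canonKey x) 0 (· + 1)) (PySem.Dict.empty : PySem.Dict (List (String × String)) Int)).contains (canonKey r)) := by
  rw [contains_foldl_modify b _ (canonKey r)]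
  simp only [pyDictEq_eq_beq]
  simp [PySem.Dict.empty, PySem.Dict.contains]

-- skipC c l : drop, for each canonical key k, the first (c k) occurrences of k in l
def skipC (c : List (String × String) → Nat) : List (List (String × String)) → List (List (String × String))
  | [] => []
  | x :: t =>
    if 0 < c (canonKey x) then
      skipC (fun k => if k = canonKey x then c k - 1 else c k) t
    else
      x :: skipC c t

theorem skipC_nil (c : List (String × String) → Nat) : skipC c [] = [] := rfl
theorem skipC_cons (c : List (String × String) → Nat) (x : List (String × String))
    (t : List (List (String × String))) :
    skipC c (x :: t) = if 0 < c (canonKey x) then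
      skipC (fun k => if k = canonKey x then c k - 1 else c k) t
    else x :: skipC c t := rfl

theorem skipC_congr {c c' : List (String × String) → Nat} (h : ∀ k, c k = c' k)
    (l : List (List (String × String))) : skipC c l = skipC c' l := by
  have : c = c' := funext h
  rw [this]

theorem removeBy_skipC (c : List (String × String) → Nat) (x : List (String × String))
    (l : List (List (String × String))) :
    removeBy (fun r => pyDictEq r x) (skipC c l)
      = skipC (fun k => if k = canonKey x then c k + 1 else c k) l := by
  induction l generalizing c with
  | nil => simp [skipC_nil, removeBy]
  | cons y t ih =>
    by_cases hk : canonKey y = canonKey x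
    · by_cases hc : 0 < c (canonKey y)
      · have hcx : 0 < (if canonKey y = canonKey x then c (canonKey y) + 1 else c (canonKey y)) := by
          simp [hk]
        rw [skipC_cons, if_pos hc, ih, skipC_cons, if_pos hcx]
        exact skipC_congr (fun k => by
          by_cases h1 : k = canonKey x <;> by_cases h2 : k = canonKey y <;> (simp_all; try omega)) t
      · have hcx : 0 < (if canonKey y = canonKey x then c (canonKey y) + 1 else c (canonKey y)) := by
          simp [hk]
        rw [skipC_cons, if_neg hc, removeBy,
          if_pos (by rw [pyDictEq_eq_beq, beq_iff_eq, hk]), skipC_cons, if_pos hcx]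
        exact skipC_congr (fun k => by
          by_cases h1 : k = canonKey x <;> by_cases h2 : k = canonKey y <;> simp_all) t
    · by_cases hc : 0 < c (canonKey y)
      · have hcx : 0 < (if canonKey y = canonKey x then c (canonKey y) + 1 else c (canonKey y)) := by
          simpa [hk] using hc
        rw [skipC_cons, if_pos hc, ih, skipC_cons, if_pos hcx]
        exact skipC_congr (fun k => by
          by_cases h1 : k = canonKey x <;> by_cases h2 : k = canonKey y <;> simp_all) t
      · have hcx : ¬ 0 < (if canonKey y = canonKey x then c (canonKey y) + 1 else c (canonKey y)) := by
          simpa [hk] using hc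
        rw [skipC_cons, if_neg hc, removeBy,
          if_neg (by rw [pyDictEq_eq_beq]; simp [hk]), skipC_cons, if_neg hcx, ih]

theorem foldl_removeBy_skipC (xs : List (List (String × String))) (b : List (List (String × String)))
    (c : List (String × String) → Nat) :
    xs.foldl (fun l r => removeBy (fun y => pyDictEq y r) l) (skipC c b)
      = skipC (fun k => c k + (xs.map canonKey).count k) b := by
  induction xs generalizing c with
  | nil => simp
  | cons x t ih =>
    simp only [List.foldl_cons, removeBy_skipC, ih, List.map_cons]
    refine skipC_congr (fun k => ?_) b
    rw [List.count_cons]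
    by_cases h : k = canonKey x
    · simp [h]; omega
    · have h2 : ¬ canonKey x = k := fun he => h he.symm
      simp [h, h2]

theorem skipC_zero (b : List (List (String × String))) : skipC (fun _ => 0) b = b := by
  induction b with
  | nil => rfl
  | cons x t ih => simp [skipC_cons, ih]

-- characterization of A's main loop
theorem A_fold (a b : List (List (String × String))) (o i ob : List (List (String × String))) :
    a.foldl (fun st item =>
      if b.any (fun r => pyDictEq r item) then
        (st.1, st.2.1 ++ [item], removeBy (fun r => pyDictEq r item) st.2.2)
      else
        (st.1 ++ [item], st.2.1, st.2.2)) (o, i, ob)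
    = (o ++ a.filter (fun r => !(b.any (fun x => pyDictEq x r))),
       i ++ a.filter (fun r => b.any (fun x => pyDictEq x r)),
       (a.filter (fun r => b.any (fun x => pyDictEq x r))).foldl
         (fun l r => removeBy (fun y => pyDictEq y r) l) ob) := by
  induction a generalizing o i ob with
  | nil => simp
  | cons x t ih =>
    simp only [List.foldl_cons, List.filter_cons]
    by_cases h : (b.any (fun r => pyDictEq r x)) = true
    · rw [if_pos h, ih]
      simp [h]
    · rw [if_neg h, ih]
      simp only [Bool.not_eq_true] at h
      simp [h]

-- characterization of B's classification loop
theorem B_fold (a : List (List (String × String))) (q : List (String × String) → Bool)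
    (o i : List (List (String × String))) (d : PySem.Dict (List (String × String)) Int) :
    a.foldl (fun st r =>
      if q r then (st.1, st.2.1 ++ [r], st.2.2.modify (canonKey r) 0 (· + 1))
      else (st.1 ++ [r], st.2.1, st.2.2)) (o, i, d)
    = (o ++ a.filter (fun r => !(q r)),
       i ++ a.filter q,
       (a.filter q).foldl (fun d r => d.modify (canonKey r) 0 (· + 1)) d) := by
  induction a generalizing o i d with
  | nil => simp
  | cons x t ih =>
    simp only [List.foldl_cons, List.filter_cons]
    by_cases h : q x = true
    · rw [if_pos h, ih]; simp [h]
    · rw [if_neg h, ih]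
      simp only [Bool.not_eq_true] at h
      simp [h]

theorem getD_empty (k : List (String × String)) :
    (PySem.Dict.empty : PySem.Dict (List (String × String)) Int).getD k 0 = 0 := rfl

-- characterization of B's emission loop
theorem B_emit (b : List (List (String × String))) (rm : PySem.Dict (List (String × String)) Int)
    (hrm : ∀ k, 0 ≤ rm.getD k 0)
    (out : List (List (String × String))) (s : PySem.Dict (List (String × String)) Int)
    (hs : ∀ k, 0 ≤ s.getD k 0) :
    (b.foldl (fun st r =>
        if rm.getD (canonKey r) 0 < (st.2.modify (canonKey r) 0 (· + 1)).getD (canonKey r) 0 then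
          (st.1 ++ [r], st.2.modify (canonKey r) 0 (· + 1))
        else (st.1, st.2.modify (canonKey r) 0 (· + 1))) (out, s)).1
    = out ++ skipC (fun k => (rm.getD k 0 - s.getD k 0).toNat) b := by
  induction b generalizing out s with
  | nil => simp [skipC_nil]
  | cons x t ih =>
    simp only [List.foldl_cons]
    have hsx : (s.modify (canonKey x) 0 (· + 1)).getD (canonKey x) 0 = s.getD (canonKey x) 0 + 1 :=
      PySem.Dict.getD_modify_self s (canonKey x) 0 (· + 1)
    have hs' : ∀ k, 0 ≤ (s.modify (canonKey x) 0 (· + 1)).getD k 0 := by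
      intro k
      by_cases h : k = canonKey x
      · rw [h, hsx]; have := hs (canonKey x); omega
      · rw [PySem.Dict.getD_modify_of_ne s 0 (· + 1) h]; exact hs k
    rw [skipC_cons]
    by_cases hc : rm.getD (canonKey x) 0 < s.getD (canonKey x) 0 + 1
    · rw [if_pos (by rw [hsx]; exact hc)]
      rw [ih _ _ hs', if_neg (by have := hs (canonKey x); omega)]
      have he : (fun k => (rm.getD k 0 - (s.modify (canonKey x) 0 (· + 1)).getD k 0).toNat)
           = (fun k => (rm.getD k 0 - s.getD k 0).toNat) := by
        funext k
        by_cases h : k = canonKey x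
        · rw [h, hsx]; have h1 := hs (canonKey x); have h2 := hrm (canonKey x); omega
        · rw [PySem.Dict.getD_modify_of_ne s 0 (· + 1) h]
      rw [he, List.append_assoc]
      simp
    · rw [if_neg (by rw [hsx]; exact hc)]
      rw [ih _ _ hs', if_pos (by have := hs (canonKey x); omega)]
      congr 1
      refine congrArg (fun c => skipC c t) (funext fun k => ?_)
      by_cases h : k = canonKey x
      · rw [h, hsx, if_pos rfl]
        have h1 := hs (canonKey x); have h2 := hrm (canonKey x); omega
      · rw [PySem.Dict.getD_modify_of_ne s 0 (· + 1) h, if_neg h]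

-- ===== VERDICT (by name: the statement is the Claim_ definition above) =====
theorem sortConfigs_py_spec : Claim_equal_sortConfigs_py := by
  intro a b _ _
  unfold Spec_sortConfigs_py sortConfigs_py sortConfigs_py_alt
  dsimp only
  rw [A_fold, B_fold]
  dsimp only
  simp only [mem_test_eq]
  simp only [Prod.mk.injEq]
  refine ⟨trivial, trivial, ?_⟩
  have hrm_eq : ∀ (xs : List (List (String × String))) (k : List (String × String)),
      ((xs.foldl (fun d r => d.modify (canonKey r) 0 (· + 1))
        (PySem.Dict.empty : PySem.Dict (List (String × String)) Int)).getD k 0)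
      = (((xs.map canonKey).count k : Int)) := by
    intro xs k
    have h := PySem.Dict.getD_foldl_modify_add_one (xs.map canonKey)
      (PySem.Dict.empty : PySem.Dict (List (String × String)) Int) k
    simp only [List.foldl_map] at h
    rw [h, getD_empty, zero_add]
  have hrm : ∀ (xs : List (List (String × String))) (k : List (String × String)),
      0 ≤ ((xs.foldl (fun d r => d.modify (canonKey r) 0 (· + 1))
        (PySem.Dict.empty : PySem.Dict (List (String × String)) Int)).getD k 0) := by
    intro xs k
    rw [hrm_eq]
    exact Int.natCast_nonneg _
  rw [B_emit b _ (hrm _) [] PySem.Dict.empty (fun k => le_of_eq (getD_empty k).symm)]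
  have hA : ∀ (xs : List (List (String × String))),
      xs.foldl (fun l r => removeBy (fun y => pyDictEq y r) l) b
        = skipC (fun k => (xs.map canonKey).count k) b := by
    intro xs
    conv_lhs => rw [← skipC_zero b]
    rw [foldl_removeBy_skipC]
    exact skipC_congr (fun k => by omega) b
  rw [hA]
  simp only [List.nil_append]
  refine skipC_congr (fun k => ?_) b
  rw [hrm_eq, getD_empty]
  omega

theorem sortConfigs_py_raises : Claim_raises_sortConfigs_py := by
  unfold Claim_raises_sortConfigs_py
  constructor
  · rintro a b _ ⟨r, hr, hany, hlt⟩ hpre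
    exact absurd (hpre r hr hany) (by omega)
  · exact ⟨by decide, by decide, by decide⟩

-- self-check: the stated raise witness indeed lies outside Pre_ (via the first half of sortConfigs_py_raises)
theorem pvRaiseWitness_not_pre_ok :
    ¬ Pre_sortConfigs_py pvRaiseWitness_sortConfigs_py.1 pvRaiseWitness_sortConfigs_py.2 :=
  sortConfigs_py_raises.1 _ _ (by decide) (by decide)
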